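-- pv_equiv track=rewrite | github.com/Wildstylez23/main | scripts/build_fish_images_index.py | best_slug_for
-- ===== SOURCE A (Python) =====
-- def best_slug_for(base, known_slugs):
--     # Try full base first, then progressively strip trailing -parts
--     candidate = base
--     parts = base.split('-')
--     for i in range(len(parts), 0, -1):
--         cand = '-'.join(parts[:i])
--         if cand in known_slugs:
--             return cand
--     # fallback: return original base
--     return candidate
-- ===== SOURCE B (Python) =====
-- def best_slug_for(base, known_slugs):
--     # Single scan over known_slugs: keep the longest slug that is a valid
--     # hyphen-boundary prefix of base (or base itself); fallback to base.
--     best = None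
--     for s in known_slugs:
--         if s == base or (len(s) < len(base) and base[len(s)] == '-' and base.startswith(s)):
--             if best is None or len(s) > len(best):
--                 best = s
--     return base if best is None else best
-- ===== Notes on version B (the rewrite author's own statement) =====
-- stated objective: alternative
-- what changed: Instead of enumerating progressively shorter '-'-joined prefixes of base and testing membership, B makes a single pass over known_slugs keeping the longest slug that is a hyphen-boundary prefix of base (or base itself), falling back to base.
import Mathlib
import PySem

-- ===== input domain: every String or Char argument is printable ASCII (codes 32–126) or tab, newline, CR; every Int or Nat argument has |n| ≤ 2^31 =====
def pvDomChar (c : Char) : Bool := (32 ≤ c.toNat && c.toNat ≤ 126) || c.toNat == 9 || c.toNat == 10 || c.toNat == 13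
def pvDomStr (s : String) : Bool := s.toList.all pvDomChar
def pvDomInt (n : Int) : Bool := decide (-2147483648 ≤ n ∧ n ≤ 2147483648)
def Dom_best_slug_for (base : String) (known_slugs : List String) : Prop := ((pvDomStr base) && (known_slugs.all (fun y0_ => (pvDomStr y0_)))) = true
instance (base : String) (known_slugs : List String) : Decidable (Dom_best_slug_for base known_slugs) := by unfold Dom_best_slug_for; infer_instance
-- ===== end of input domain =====

-- B replaces A's enumeration of progressively shorter '-'-joined prefixes (with a membership
-- test each) by ONE pass over known_slugs keeping the longest slug that is a hyphen-boundary
-- prefix of base (or base itself); objective: alternative algorithm (scan the other collection).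

-- ===== PORT A =====
-- the 'for i in range(len(parts), 0, -1)' loop as a countdown recursion; the argument i+1 is Python's i
def bsfA_go (parts : List String) (known_slugs : List String) (candidate : String) : Nat → String
  | 0 => candidate                       -- loop exhausted: fallback, return original base
  | i + 1 =>
      let cand := PySem.Str.join "-" (PySem.List.slice parts none (some ((i + 1 : Nat) : Int)))
      if PySem.Set.contains known_slugs cand then cand else bsfA_go parts known_slugs candidate i

def best_slug_for (base : String) (known_slugs : List String) : String :=
  let candidate := base
  let parts := (PySem.Str.split? base "-").getD []   -- base.split('-'); sep ≠ "" so split? is some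
  bsfA_go parts known_slugs candidate parts.length

-- ===== PORT B =====
-- 's == base or (len(s) < len(base) and base[len(s)] == '-' and base.startswith(s))'
def bsfB_valid (base s : String) : Bool :=
  s == base ||
    (decide (PySem.Str.len s < PySem.Str.len base) &&
     (PySem.Str.pyGet? base (PySem.Str.len s) == some '-') &&
     PySem.Str.startswith base s)

-- the 'for s in known_slugs' loop with the running best (None → Option.none)
def bsfB_go (base : String) : List String → Option String → Option String
  | [], best => best
  | s :: rest, best =>
      if bsfB_valid base s then
        match best with
        | none => bsfB_go base rest (some s)
        | some b => if PySem.Str.len s > PySem.Str.len b then bsfB_go base rest (some s)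
                    else bsfB_go base rest (some b)
      else bsfB_go base rest best

def best_slug_for_alt (base : String) (known_slugs : List String) : String :=
  match bsfB_go base known_slugs none with
  | none => base
  | some b => b

-- ===== PRECONDITION & SPEC =====
def Spec_best_slug_for (base : String) (known_slugs : List String) (out : String) : Prop := out = best_slug_for_alt base known_slugs
instance (base : String) (known_slugs : List String) (out : String) : Decidable (Spec_best_slug_for base known_slugs out) := by unfold Spec_best_slug_for; infer_instance

-- ===== CLAIM (what is proved, stated in full; the proofs are below) =====
def Claim_equal_best_slug_for : Prop := ∀ (base : String) (known_slugs : List String), Dom_best_slug_for base known_slugs → Spec_best_slug_for base known_slugs (best_slug_for base known_slugs)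

-- ===== LEMMAS AND PROOFS =====

-- reference single-char split on '-' (accumulator-free form of Chars.splitOn.go)
def spl (pre : List Char) : List Char → List (List Char)
  | [] => [pre]
  | c :: rest => if c = '-' then pre :: spl [] rest else spl (pre ++ [c]) rest

lemma splitOn_go_eq_spl :
    ∀ (l : List Char) (fuel : Nat) (cur : List Char) (acc : List (List Char)),
      l.length < fuel →
      PySem.Chars.splitOn.go ['-'] fuel l cur acc = acc.reverse ++ spl cur.reverse l := by
  intro l
  induction l with
  | nil =>
      intro fuel cur acc h
      match fuel with
      | f + 1 => rw [PySem.Chars.splitOn.go.eq_def]; simp [spl]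
  | cons c rest ih =>
      intro fuel cur acc h
      match fuel, h with
      | f + 1, h =>
        rw [PySem.Chars.splitOn.go.eq_def]
        by_cases hc : c = '-'
        · subst hc
          simp only [List.isPrefixOf, BEq.rfl, Bool.true_and, if_true]
          rw [show List.drop ['-'].length ('-' :: rest) = rest from rfl,
              ih _ _ _ (by simpa using Nat.lt_of_succ_lt_succ h)]
          simp [spl]
        · have hpre : (['-'].isPrefixOf (c :: rest)) = false := by
            simp [List.isPrefixOf]
            intro hch; exact absurd hch.symm hc
          simp only [hpre, Bool.false_eq_true, if_false]
          rw [ih _ _ _ (by simpa using Nat.lt_of_succ_lt_succ h)]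
          simp [spl, hc]

lemma splitOn_eq_spl (cs : List Char) : PySem.Chars.splitOn cs ['-'] = spl [] cs := by
  unfold PySem.Chars.splitOn
  rw [splitOn_go_eq_spl cs (cs.length + 1) [] [] (Nat.lt_succ_self _)]
  simp

lemma spl_ne_nil (pre l : List Char) : spl pre l ≠ [] := by
  induction l generalizing pre with
  | nil => simp [spl]
  | cons c rest ih => by_cases hc : c = '-' <;> simp [spl, hc, ih]

lemma join_spl (l : List Char) : ∀ pre, PySem.Chars.join ['-'] (spl pre l) = pre ++ l := by
  induction l with
  | nil => intro pre; simp [spl, PySem.Chars.join, List.intercalate]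
  | cons c rest ih =>
      intro pre
      by_cases hc : c = '-'
      · subst hc
        simp only [spl, if_true]
        obtain ⟨q, qs, hq⟩ := List.exists_cons_of_ne_nil (spl_ne_nil [] rest)
        rw [hq, PySem.Chars.join_cons_cons, ← hq, ih []]
        simp
      · simp only [spl, hc, if_false]
        rw [ih (pre ++ [c])]; simp

lemma spl_hyphen_free (l : List Char) :
    ∀ pre, '-' ∉ pre → ∀ q ∈ spl pre l, '-' ∉ q := by
  induction l with
  | nil => intro pre hpre q hq; simp [spl] at hq; subst hq; exact hpre
  | cons c rest ih =>
      intro pre hpre q hq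
      by_cases hc : c = '-'
      · subst hc
        simp only [spl, if_true, List.mem_cons] at hq
        rcases hq with h | h
        · subst h; exact hpre
        · exact ih [] (by simp) q h
      · simp only [spl, hc, if_false] at hq
        refine ih (pre ++ [c]) ?_ q hq
        simp [hpre]; exact fun h => hc h.symm

lemma join_app (xs ys : List (List Char)) (hx : xs ≠ []) (hy : ys ≠ []) :
    PySem.Chars.join ['-'] (xs ++ ys) = PySem.Chars.join ['-'] xs ++ '-' :: PySem.Chars.join ['-'] ys := by
  induction xs with
  | nil => exact absurd rfl hx
  | cons x xs ih =>
      cases xs with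
      | nil =>
          obtain ⟨y, ys', hys⟩ := List.exists_cons_of_ne_nil hy
          subst hys
          rw [List.singleton_append, PySem.Chars.join_cons_cons, PySem.Chars.join_singleton]
          simp
      | cons x' xs' =>
          have h1 : (x :: x' :: xs') ++ ys = x :: x' :: (xs' ++ ys) := by simp
          rw [h1, PySem.Chars.join_cons_cons,
              show x' :: (xs' ++ ys) = (x' :: xs') ++ ys from rfl, ih (by simp),
              PySem.Chars.join_cons_cons]
          simp

-- the j-th candidate of A, as a char list: '-'.join(parts[:j])
def candC (ps : List (List Char)) (j : Nat) : List Char := PySem.Chars.join ['-'] (ps.take j)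

-- validity predicate over char lists matching bsfB_valid
def validC (b t : List Char) : Prop := t = b ∨ (t <+: b ∧ t.length < b.length ∧ b[t.length]? = some '-')

lemma validC_iff (base s : String) : bsfB_valid base s = true ↔ validC base.toList s.toList := by
  unfold bsfB_valid validC
  constructor
  · intro h
    simp only [Bool.or_eq_true, Bool.and_eq_true, beq_iff_eq, decide_eq_true_eq] at h
    rcases h with h | ⟨⟨hlen, hget⟩, hpre⟩
    · left; rw [h]
    · right
      rw [PySem.Str.startswith_eq, PySem.Chars.startswith_iff] at hpre
      refine ⟨hpre, ?_, ?_⟩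
      · rw [PySem.Str.len_eq, PySem.Str.len_eq] at hlen; exact_mod_cast hlen
      · rw [PySem.Str.len_eq, PySem.Str.pyGet?_natCast] at hget; exact hget
  · intro h
    simp only [Bool.or_eq_true, Bool.and_eq_true, beq_iff_eq, decide_eq_true_eq]
    rcases h with h | ⟨hpre, hlen, hget⟩
    · left; exact String.toList_inj.mp h
    · right
      refine ⟨⟨?_, ?_⟩, ?_⟩
      · rw [PySem.Str.len_eq, PySem.Str.len_eq]; exact_mod_cast hlen
      · rw [PySem.Str.len_eq, PySem.Str.pyGet?_natCast]; exact hget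
      · rw [PySem.Str.startswith_eq, PySem.Chars.startswith_iff]; exact hpre

-- every candidate is valid, every valid string is a candidate (for hyphen-free nonempty pieces)
lemma cand_prefix_decomp (ps : List (List Char)) (j : Nat) (h1 : 1 ≤ j) (hj : j < ps.length) :
    PySem.Chars.join ['-'] ps = candC ps j ++ '-' :: PySem.Chars.join ['-'] (ps.drop j) := by
  conv_lhs => rw [← List.take_append_drop j ps]
  refine join_app _ _ (fun h => ?_) (fun h => ?_)
  · have := congrArg List.length h
    rw [List.length_take] at this
    simp only [List.length_nil] at this
    omega
  · have := congrArg List.length h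
    rw [List.length_drop] at this
    simp only [List.length_nil] at this
    omega

lemma cand_valid (ps : List (List Char)) (j : Nat) (h1 : 1 ≤ j) (hj : j ≤ ps.length) :
    validC (PySem.Chars.join ['-'] ps) (candC ps j) := by
  rcases Nat.lt_or_ge j ps.length with hlt | hge
  · right
    have hd := cand_prefix_decomp ps j h1 hlt
    refine ⟨⟨'-' :: PySem.Chars.join ['-'] (ps.drop j), hd.symm⟩, ?_, ?_⟩
    · rw [hd]; simp
    · rw [hd, List.getElem?_append_right (le_refl _)]; simp
  · left
    have : j = ps.length := le_antisymm hj hge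
    subst this
    simp [candC]

lemma valid_is_cand (ps : List (List Char)) (hne : ps ≠ []) (hfree : ∀ q ∈ ps, '-' ∉ q) :
    ∀ t, validC (PySem.Chars.join ['-'] ps) t → ∃ j, 1 ≤ j ∧ j ≤ ps.length ∧ t = candC ps j := by
  induction ps using List.reverseRecOn with
  | nil => exact absurd rfl hne
  | append_singleton qs q ih =>
      intro t hv
      rcases hv with h | ⟨hpre, hlen, hget⟩
      · exact ⟨(qs ++ [q]).length, by simp, le_refl _, by unfold candC; rw [List.take_length]; exact h⟩
      · cases qs with
        | nil =>
            -- join [q] = q, hyphen-free: boundary case impossible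
            exfalso
            simp only [List.nil_append, PySem.Chars.join_singleton] at hget hlen
            exact hfree q (by simp) (List.mem_of_getElem? hget)
        | cons x xs =>
            have hqs : (x :: xs) ≠ ([] : List (List Char)) := by simp
            have hdec : PySem.Chars.join ['-'] ((x :: xs) ++ [q])
                = PySem.Chars.join ['-'] (x :: xs) ++ '-' :: q := by
              rw [join_app _ _ hqs (by simp), PySem.Chars.join_singleton]
            set J := PySem.Chars.join ['-'] (x :: xs) with hJ
            rcases Nat.lt_trichotomy t.length J.length with hc | hc | hc
            · -- strictly inside the prefix: valid for the shorter join, use IH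
              have hfull : t <+: J ++ '-' :: q := by rwa [hdec] at hpre
              have hpre' : t <+: J :=
                List.prefix_of_prefix_length_le hfull ⟨'-' :: q, rfl⟩ (Nat.le_of_lt hc)
              have hget' : J[t.length]? = some '-' := by
                rw [hdec, List.getElem?_append_left hc] at hget
                exact hget
              obtain ⟨j, hj1, hj2, hjt⟩ := ih (by simp)
                (fun r hr => hfree r (List.mem_append_left _ hr)) t (Or.inr ⟨hpre', hc, hget'⟩)
              refine ⟨j, hj1, le_trans hj2 (by simp), ?_⟩
              rw [hjt]
              unfold candC
              rw [List.take_append_of_le_length (by simpa using hj2)]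
            · -- exactly the shorter join
              refine ⟨(x :: xs).length, by simp, by simp, ?_⟩
              have hfull : t <+: J ++ '-' :: q := by rwa [hdec] at hpre
              have ht : t <+: J :=
                List.prefix_of_prefix_length_le hfull ⟨'-' :: q, rfl⟩ (Nat.le_of_eq hc)
              have : t = J := List.IsPrefix.eq_of_length ht hc
              rw [this]
              unfold candC
              rw [List.take_append_of_le_length (le_refl _), List.take_length]
            · -- beyond the separator: the char at t.length lies in hyphen-free q
              exfalso
              rw [hdec] at hget hlen
              have hgt : J.length + 1 ≤ t.length := hc
              have : ('-' :: q)[t.length - J.length]? = some '-' := by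
                rw [List.getElem?_append_right (Nat.le_of_lt hc)] at hget
                exact hget
              have hq : q[t.length - J.length - 1]? = some '-' := by
                rcases Nat.exists_eq_add_of_le hgt with ⟨k, hk⟩
                rw [hk] at this ⊢
                rw [show J.length + 1 + k - J.length = k + 1 by omega] at this
                rw [show J.length + 1 + k - J.length - 1 = k by omega]
                simpa using this
              exact hfree q (by simp) (List.mem_of_getElem? hq)

-- lengths of candidates are strictly monotone in j on [1..n]
lemma cand_len_mono (ps : List (List Char)) :
    ∀ j j', 1 ≤ j → j < j' → j' ≤ ps.length → (candC ps j).length < (candC ps j').length := by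
  intro j j' hj hjj hj'
  have step : ∀ k, 1 ≤ k → k < ps.length → (candC ps k).length < (candC ps (k + 1)).length := by
    intro k hk1 hk2
    have htake : ps.take (k + 1) = ps.take k ++ [ps[k]] := by
      rw [List.take_add_one, List.getElem?_eq_getElem hk2]; rfl
    have hne1 : ps.take k ≠ [] := by
      intro h
      have := congrArg List.length h
      rw [List.length_take] at this
      simp only [List.length_nil] at this
      omega
    unfold candC
    rw [htake, join_app _ _ hne1 (by simp), PySem.Chars.join_singleton]
    simp
  have main : ∀ k, j < k → k ≤ ps.length → (candC ps j).length < (candC ps k).length := by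
    intro k
    induction k with
    | zero => omega
    | succ m ih =>
        intro hjm hm
        rcases Nat.lt_or_ge j m with h | h
        · exact lt_trans (ih h (by omega)) (step m (by omega) (by omega))
        · have hje : j = m := by omega
          subst hje
          exact step j hj (by omega)
  exact main j' hjj hj'

-- A's loop: characterization of bsfA_go at fuel i (over the mapped pieces)
lemma A_char (ps : List (List Char)) (ks : List String) (base : String) :
    ∀ i, i ≤ ps.length →
      (bsfA_go (ps.map String.ofList) ks base i = base ∧
        ∀ j, 1 ≤ j → j ≤ i → ¬ PySem.Set.contains ks (String.ofList (candC ps j)) = true) ∨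
      (∃ j, 1 ≤ j ∧ j ≤ i ∧ PySem.Set.contains ks (String.ofList (candC ps j)) = true ∧
        bsfA_go (ps.map String.ofList) ks base i = String.ofList (candC ps j) ∧
        ∀ j', j < j' → j' ≤ i → ¬ PySem.Set.contains ks (String.ofList (candC ps j')) = true) := by
  intro i
  induction i with
  | zero => intro _; left; exact ⟨rfl, by omega⟩
  | succ m ih =>
      intro hm
      have hcand : PySem.Str.join "-" (PySem.List.slice (ps.map String.ofList) none (some ((m + 1 : Nat) : Int)))
          = String.ofList (candC ps (m + 1)) := by
        rw [PySem.List.slice_to_natCast, ← List.map_take]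
        simp [PySem.Str.join, candC, Function.comp_def]
      by_cases hmem : PySem.Set.contains ks (String.ofList (candC ps (m + 1))) = true
      · right
        refine ⟨m + 1, by omega, le_refl _, hmem, ?_, by omega⟩
        simp only [bsfA_go, hcand, hmem, if_true]
      · rcases ih (by omega) with ⟨hval, hnone⟩ | ⟨j, hj1, hj2, hjmem, hjval, hjmax⟩
        · left
          refine ⟨?_, ?_⟩
          · simp only [bsfA_go, hcand, hmem, Bool.false_eq_true, if_false]; exact hval
          · intro j h1 h2
            rcases Nat.lt_or_ge j (m + 1) with h | h
            · exact hnone j h1 (by omega)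
            · have : j = m + 1 := by omega
              subst this; exact hmem
        · right
          refine ⟨j, hj1, by omega, hjmem, ?_, ?_⟩
          · simp only [bsfA_go, hcand, hmem, Bool.false_eq_true, if_false]; exact hjval
          · intro j' h1 h2
            rcases Nat.lt_or_ge j' (m + 1) with h | h
            · exact hjmax j' h1 (by omega)
            · have : j' = m + 1 := by omega
              subst this; exact hmem

-- B's loop: characterization of the fold over known_slugs
lemma B_char (base : String) :
    ∀ (ks : List String) (acc : Option String),
      (bsfB_go base ks acc = acc ∧
        ∀ s ∈ ks, bsfB_valid base s = true → ∃ t, acc = some t ∧ PySem.Str.len s ≤ PySem.Str.len t) ∨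
      (∃ t, bsfB_go base ks acc = some t ∧ t ∈ ks ∧ bsfB_valid base t = true ∧
        (∀ s ∈ ks, bsfB_valid base s = true → PySem.Str.len s ≤ PySem.Str.len t) ∧
        (∀ u, acc = some u → PySem.Str.len u ≤ PySem.Str.len t)) := by
  intro ks
  induction ks with
  | nil => intro acc; left; exact ⟨rfl, by simp⟩
  | cons s rest ih =>
      intro acc
      by_cases hv : bsfB_valid base s = true
      · -- analyse which accumulator the step passes on
        rcases hacc : acc with _ | u
        · -- acc = none: recurse with some s
          have heq : bsfB_go base (s :: rest) none = bsfB_go base rest (some s) := by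
            simp only [bsfB_go, hv, if_true]
          rcases ih (some s) with ⟨hval, hmax⟩ | ⟨t, hval, htmem, htv, htmax, htacc⟩
          · right
            refine ⟨s, by rw [heq, hval], by simp, hv, ?_, by simp⟩
            intro s' hs' hv'
            rcases List.mem_cons.mp hs' with h | h
            · subst h; exact le_refl _
            · obtain ⟨t, ht, hle⟩ := hmax s' h hv'
              cases ht; exact hle
          · right
            refine ⟨t, by rw [heq, hval], by simp [htmem], htv, ?_, by simp⟩
            intro s' hs' hv'
            rcases List.mem_cons.mp hs' with h | h
            · subst h; exact htacc s' rfl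
            · exact htmax s' h hv'
        · by_cases hgt : PySem.Str.len s > PySem.Str.len u
          · have heq : bsfB_go base (s :: rest) (some u) = bsfB_go base rest (some s) := by
              simp only [bsfB_go, hv, if_true, hgt]
            rcases ih (some s) with ⟨hval, hmax⟩ | ⟨t, hval, htmem, htv, htmax, htacc⟩
            · right
              refine ⟨s, by rw [heq, hval], by simp, hv, ?_, ?_⟩
              · intro s' hs' hv'
                rcases List.mem_cons.mp hs' with h | h
                · subst h; exact le_refl _
                · obtain ⟨t, ht, hle⟩ := hmax s' h hv'
                  cases ht; exact hle
              · intro u' hu'; cases hu'; exact le_of_lt hgt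
            · right
              refine ⟨t, by rw [heq, hval], by simp [htmem], htv, ?_, ?_⟩
              · intro s' hs' hv'
                rcases List.mem_cons.mp hs' with h | h
                · subst h; exact htacc s' rfl
                · exact htmax s' h hv'
              · intro u' hu'; cases hu'
                exact le_trans (le_of_lt hgt) (htacc s rfl)
          · have heq : bsfB_go base (s :: rest) (some u) = bsfB_go base rest (some u) := by
              simp only [bsfB_go, hv, if_true, hgt, if_false]
            have hle : PySem.Str.len s ≤ PySem.Str.len u := by omega
            rcases ih (some u) with ⟨hval, hmax⟩ | ⟨t, hval, htmem, htv, htmax, htacc⟩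
            · left
              refine ⟨by rw [heq, hval], ?_⟩
              intro s' hs' hv'
              rcases List.mem_cons.mp hs' with h | h
              · subst h; exact ⟨u, rfl, hle⟩
              · exact hmax s' h hv'
            · right
              refine ⟨t, by rw [heq, hval], by simp [htmem], htv, ?_, htacc⟩
              intro s' hs' hv'
              rcases List.mem_cons.mp hs' with h | h
              · subst h; exact le_trans hle (htacc u rfl)
              · exact htmax s' h hv'
      · have heq : bsfB_go base (s :: rest) acc = bsfB_go base rest acc := by
          simp only [bsfB_go, hv, Bool.false_eq_true, if_false]
        rcases ih acc with ⟨hval, hmax⟩ | ⟨t, hval, htmem, htv, htmax, htacc⟩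
        · left
          refine ⟨by rw [heq, hval], ?_⟩
          intro s' hs' hv'
          rcases List.mem_cons.mp hs' with h | h
          · subst h; exact absurd hv' hv
          · exact hmax s' h hv'
        · right
          refine ⟨t, by rw [heq, hval], by simp [htmem], htv, ?_, htacc⟩
          intro s' hs' hv'
          rcases List.mem_cons.mp hs' with h | h
          · subst h; exact absurd hv' hv
          · exact htmax s' h hv'

lemma contains_iff_mem (ks : List String) (x : String) :
    PySem.Set.contains ks x = true ↔ x ∈ ks := PySem.Set.contains_iff ks x

-- ===== VERDICT (by name: the statement is the Claim_ definition above) =====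
theorem best_slug_for_spec : Claim_equal_best_slug_for := by
  intro base ks _
  unfold Spec_best_slug_for best_slug_for best_slug_for_alt
  set b := base.toList with hb
  have hsep : ("-" : String).toList = ['-'] := rfl
  have hsplit : (PySem.Str.split? base "-").getD [] = (spl [] b).map String.ofList := by
    rw [hb]
    simp [PySem.Str.split?, PySem.Chars.split?, hsep, splitOn_eq_spl]
  rw [hsplit]
  set ps := spl [] b with hps
  have hpsne : ps ≠ [] := spl_ne_nil [] b
  have hfree : ∀ q ∈ ps, '-' ∉ q := spl_hyphen_free b [] (by simp)
  have hjoin : PySem.Chars.join ['-'] ps = b := by simpa using join_spl b []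
  have hn1 : 1 ≤ ps.length := by
    cases hq : ps with
    | nil => exact absurd hq hpsne
    | cons _ _ => simp
  -- base as ofList of the full candidate
  have hbase : String.ofList (candC ps ps.length) = base := by
    unfold candC; rw [List.take_length, hjoin, hb, String.ofList_toList]
  -- valid strings s are exactly candidates
  have hvalid_cand : ∀ j, 1 ≤ j → j ≤ ps.length → bsfB_valid base (String.ofList (candC ps j)) = true := by
    intro j h1 h2
    rw [validC_iff, String.toList_ofList, ← hb, ← hjoin]
    exact cand_valid ps j h1 h2
  have hcand_of_valid : ∀ s, bsfB_valid base s = true →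
      ∃ j, 1 ≤ j ∧ j ≤ ps.length ∧ s = String.ofList (candC ps j) := by
    intro s hs
    rw [validC_iff, ← hb, ← hjoin] at hs
    obtain ⟨j, h1, h2, h3⟩ := valid_is_cand ps hpsne hfree s.toList hs
    exact ⟨j, h1, h2, by rw [← h3, String.ofList_toList]⟩
  -- lengths: Str.len of candidates strictly monotone
  have hlenc : ∀ j, PySem.Str.len (String.ofList (candC ps j)) = ((candC ps j).length : Int) := by
    intro j; rw [PySem.Str.len_eq, String.toList_ofList]
  have hmono : ∀ j j', 1 ≤ j → 1 ≤ j' → j ≤ ps.length → j' ≤ ps.length →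
      PySem.Str.len (String.ofList (candC ps j)) ≤ PySem.Str.len (String.ofList (candC ps j')) → j ≤ j' := by
    intro j j' h1 h1' h2 h2' hle
    by_contra hcon
    have : (candC ps j').length < (candC ps j).length := cand_len_mono ps j' j h1' (by omega) h2
    rw [hlenc, hlenc] at hle
    omega
  simp only [List.length_map]
  rcases A_char ps ks base ps.length (le_refl _) with ⟨hAval, hAnone⟩ | ⟨j, hj1, hj2, hjmem, hjval, hjmax⟩ <;>
    rcases B_char base ks none with ⟨hBval, hBnone⟩ | ⟨t, hBval, htmem, htv, htmax, _⟩
  · rw [hAval, hBval]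
  · -- A found nothing, but B found valid t ∈ ks: t is a candidate, contradiction
    exfalso
    obtain ⟨j, h1, h2, h3⟩ := hcand_of_valid t htv
    exact hAnone j h1 h2 (by rw [← h3, contains_iff_mem]; exact htmem)
  · -- A found cand j, B found nothing: cand j ∈ ks and valid, contradiction
    exfalso
    obtain ⟨u, hu, _⟩ := hBnone (String.ofList (candC ps j))
      ((contains_iff_mem ks _).mp hjmem) (hvalid_cand j hj1 hj2)
    cases hu
  · -- both found: t = cand j' and maximality pins j = j'
    rw [hjval, hBval]
    obtain ⟨j', h1', h2', h3'⟩ := hcand_of_valid t htv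
    have hj'mem : PySem.Set.contains ks (String.ofList (candC ps j')) = true := by
      rw [← h3', contains_iff_mem]; exact htmem
    have hle1 : j' ≤ j := by
      by_contra hcon
      exact hjmax j' (by omega) h2' hj'mem
    have hle2 : j ≤ j' := by
      have hlen : PySem.Str.len (String.ofList (candC ps j)) ≤ PySem.Str.len t :=
        htmax _ ((contains_iff_mem ks _).mp hjmem) (hvalid_cand j hj1 hj2)
      rw [h3'] at hlen
      exact hmono j j' hj1 h1' hj2 h2' hlen
    have : j = j' := by omega
    rw [this, ← h3']
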